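-- pv_equiv track=rewrite | github.com/IrishMorales/modelling-personality-from-twts | count.py | count_rep_chars
-- ===== SOURCE A (Python) =====
-- from itertools import groupby
--
-- def count_rep_chars(tweet):
--     '''
--     1. converts word to lowercase using .lower()
--     2. group consecutive unique chars in each word using groupby()
--     3. iterates over groups
--     4. count times each char is repeated in current group
--     5. if char repeated in current group > 1 time, add to sum
--     Example:
--     groups = groupby("Tttteeeeests".lower())
--     - returns ((t, <itertools._grouper object>),
--                (e, <itertools._grouper object>),
--                (s, <itertools._grouper object>),
--                (t, <itertools._grouper object>),
--                (s, <itertools._grouper object>))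
--     '''
--     charRepSum = 0
--     for word in tweet:
--         groups = groupby(word.lower())
--         for group in groups:
--             charRep = (sum(1 for char in group[1]))
--             if (charRep > 1):
--                 charRepSum += charRep
--     return charRepSum
-- ===== SOURCE B (Python) =====
-- def count_rep_chars(tweet):
--     total = 0
--     for word in tweet:
--         w = word.lower()
--         for i in range(1, len(w)):
--             if w[i] == w[i - 1]:
--                 # start of a repeated run contributes 2, continuation 1
--                 total += 2 if (i == 1 or w[i - 2] != w[i - 1]) else 1
--     return total
-- ===== Notes on version B (the rewrite author's own statement) =====
-- stated objective: faster
-- what changed: Replaces itertools.groupby run-grouping plus per-group generator counting with a single pairwise index scan over adjacent characters that adds 2 at the start of each repeated run and 1 for each continuation.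
import Mathlib
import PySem

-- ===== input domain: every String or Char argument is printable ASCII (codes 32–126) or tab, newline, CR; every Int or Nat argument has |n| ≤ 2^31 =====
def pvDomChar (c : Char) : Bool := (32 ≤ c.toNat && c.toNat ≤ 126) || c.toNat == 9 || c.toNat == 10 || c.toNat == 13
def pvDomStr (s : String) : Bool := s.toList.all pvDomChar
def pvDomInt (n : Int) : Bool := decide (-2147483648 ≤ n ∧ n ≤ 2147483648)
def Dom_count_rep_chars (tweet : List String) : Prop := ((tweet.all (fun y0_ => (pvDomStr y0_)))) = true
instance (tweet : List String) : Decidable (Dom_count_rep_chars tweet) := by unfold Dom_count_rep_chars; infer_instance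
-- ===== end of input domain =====

-- B replaces the groupby grouping by a single pairwise scan (2 per run start, 1 per continuation); return values proved equal.

-- ===== PORT A =====
-- groupby(word.lower()): splits the char list into maximal runs of equal chars;
-- for each run, charRep = its length, added when > 1.
def pvGroups (l : List Char) : Int :=
  match l with
  | [] => 0
  | c :: rest =>
    let run := rest.takeWhile (· == c)
    let charRep : Int := 1 + run.length
    (if charRep > 1 then charRep else 0) + pvGroups (rest.dropWhile (· == c))
termination_by l.length
decreasing_by
  simp only [List.length_cons]
  exact Nat.lt_succ_of_le (List.length_dropWhile_le _ _)

def count_rep_chars (tweet : List String) : Int :=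
  tweet.foldl (fun charRepSum word => charRepSum + pvGroups (PySem.Str.lower word).toList) 0

-- ===== PORT B =====
-- the index loop `for i in range(1, len(w))` as a recursion carrying w[i-1] (prev) and w[i-2] (pp)
def pvAltGo (prev : Char) (l : List Char) (pp : Option Char) : Int :=
  match l with
  | [] => 0
  | c :: rest =>
    (if c == prev then
      (if (match pp with | none => true | some p => p != prev) then (2 : Int) else 1)
     else 0) + pvAltGo c rest (some prev)

def pvAltWord (w : List Char) : Int :=
  match w with
  | [] => 0
  | c :: rest => pvAltGo c rest none

def count_rep_chars_alt (tweet : List String) : Int :=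
  tweet.foldl (fun total word => total + pvAltWord (PySem.Str.lower word).toList) 0

-- ===== PRECONDITION & SPEC =====
def Spec_count_rep_chars (tweet : List String) (out : Int) : Prop := out = count_rep_chars_alt tweet
instance (tweet : List String) (out : Int) : Decidable (Spec_count_rep_chars tweet out) := by unfold Spec_count_rep_chars; infer_instance

-- ===== CLAIM (what is proved, stated in full; the proofs are below) =====
def Claim_equal_count_rep_chars : Prop := ∀ (tweet : List String), Dom_count_rep_chars tweet → Spec_count_rep_chars tweet (count_rep_chars tweet)

-- ===== LEMMAS AND PROOFS =====

-- a different previous-previous char does not matter once prev changed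
theorem pvAltGo_some_ne (c d : Char) (l : List Char) (h : d ≠ c) :
    pvAltGo c l (some d) = pvAltGo c l none := by
  cases l with
  | nil => rfl
  | cons x rest =>
    simp only [pvAltGo]
    have : (d != c) = true := by simp [h]
    simp [this]

-- inside a run: each further equal char adds 1, then the next run starts fresh
theorem pvAltGo_some_self (l : List Char) (c : Char) :
    pvAltGo c l (some c) =
      ((l.takeWhile (· == c)).length : Int) + pvAltWord (l.dropWhile (· == c)) := by
  induction l generalizing c with
  | nil => simp [pvAltGo, pvAltWord]
  | cons x rest ih =>
    by_cases hx : x = c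
    · subst hx
      simp only [pvAltGo, beq_self_eq_true, if_pos, bne_self_eq_false,
        Bool.false_eq_true, if_false, List.takeWhile_cons_of_pos, List.dropWhile_cons_of_pos,
        List.length_cons]
      rw [ih x]
      push_cast; ring
    · have hbe : (x == c) = false := by simp [hx]
      simp only [pvAltGo, hbe, Bool.false_eq_true, if_false,
        pvAltGo_some_ne x c rest (fun h => hx h.symm)]
      simp [pvAltWord, hbe]

-- the pairwise scan, per maximal run at the front
theorem pvAltGo_none (rest : List Char) (c : Char) :
    pvAltGo c rest none =
      (if (1 : Int) + ((rest.takeWhile (· == c)).length : Int) > 1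
        then 1 + ((rest.takeWhile (· == c)).length : Int) else 0) +
      pvAltWord (rest.dropWhile (· == c)) := by
  cases rest with
  | nil => simp [pvAltGo, pvAltWord]
  | cons x r =>
    by_cases hx : x = c
    · subst hx
      simp only [pvAltGo, beq_self_eq_true, if_pos,
        List.takeWhile_cons_of_pos, List.dropWhile_cons_of_pos, List.length_cons]
      rw [pvAltGo_some_self r x]
      have : (1 : Int) + ((r.takeWhile (· == x)).length + 1 : ℕ) > 1 := by
        push_cast; omega
      rw [if_pos this]
      push_cast; ring
    · have hbe : (x == c) = false := by simp [hx]
      simp only [pvAltGo, hbe, Bool.false_eq_true, if_false]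
      rw [List.takeWhile_cons_of_neg (by simp [hx]),
          List.dropWhile_cons_of_neg (by simp [hx]),
          pvAltGo_some_ne x c r (fun h => hx h.symm)]
      norm_num [pvAltWord]

theorem pvAltWord_eq_pvGroups (l : List Char) : pvAltWord l = pvGroups l := by
  induction l using pvGroups.induct with
  | case1 => simp [pvAltWord, pvGroups]
  | case2 c rest ih =>
    simp only [pvAltWord, pvGroups]
    rw [pvAltGo_none, ih]

-- ===== VERDICT (by name: the statement is the Claim_ definition above) =====
theorem count_rep_chars_spec : Claim_equal_count_rep_chars := by
  intro tweet _
  unfold Spec_count_rep_chars count_rep_chars count_rep_chars_alt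
  induction tweet using List.reverseRecOn with
  | nil => rfl
  | append_singleton xs x ih => simp [List.foldl_append, pvAltWord_eq_pvGroups]
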